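-- pv_equiv track=rewrite | github.com/SplashTheBatya/ZapryagVSU | SpecialConverter.py | dec_to_gray_code_changer
-- ===== SOURCE A (Python) =====
-- def dec_to_bin_changer(dec: str):
--     dec = int(dec)
--     binary_str = ''
--     while dec > 0:
--         binary_str = str(dec % 2) + binary_str
--         dec = dec // 2
--     while len(binary_str) % 4 != 0:
--         binary_str = '0' + binary_str
--     return binary_str
--
-- def bin_to_gray_code_changer(bin: str):
--     bin_arr = [x for x in bin]
--     gray_result_arr = [bin_arr[0]]
--     for bin_iter in range(1, len(bin_arr)):
--         if int(bin_arr[bin_iter]) + int(bin_arr[bin_iter - 1]) == 2: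
--             gray_result_arr.append('0')
--         else:
--             gray_result_arr.append(str(int(bin_arr[bin_iter]) + int(bin_arr[bin_iter - 1])))
--
--     gray_result = ''
--     for iter in gray_result_arr:
--         gray_result += iter
--     return gray_result
--
-- def dec_to_gray_code_changer(dec: str):
--     bin_num = dec_to_bin_changer(dec)
--     bin_arr = [x for x in bin_num]
--     bin_num = ''
--     for iter in bin_arr:
--         bin_num += iter
--     while len(bin_num) % 4 != 0:
--         bin_num = '0' + bin_num
--     return bin_to_gray_code_changer(bin_num)
-- ===== SOURCE B (Python) =====
-- def dec_to_gray_code_changer(dec: str):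
--     n = int(dec)
--     gray = n ^ (n >> 1)
--     width = (n.bit_length() + 3) // 4 * 4
--     return format(gray, 'b').zfill(width)
-- ===== Notes on version B (the rewrite author's own statement) =====
-- stated objective: faster
-- what changed: Replaces the per-bit dec-to-binary loop, two pad-to-multiple-of-4 loops and the adjacent-digit Gray loop with the closed-form Gray integer n ^ (n >> 1) formatted once as a zero-filled binary string of width ceil(bit_length/4)*4.
import Mathlib
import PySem

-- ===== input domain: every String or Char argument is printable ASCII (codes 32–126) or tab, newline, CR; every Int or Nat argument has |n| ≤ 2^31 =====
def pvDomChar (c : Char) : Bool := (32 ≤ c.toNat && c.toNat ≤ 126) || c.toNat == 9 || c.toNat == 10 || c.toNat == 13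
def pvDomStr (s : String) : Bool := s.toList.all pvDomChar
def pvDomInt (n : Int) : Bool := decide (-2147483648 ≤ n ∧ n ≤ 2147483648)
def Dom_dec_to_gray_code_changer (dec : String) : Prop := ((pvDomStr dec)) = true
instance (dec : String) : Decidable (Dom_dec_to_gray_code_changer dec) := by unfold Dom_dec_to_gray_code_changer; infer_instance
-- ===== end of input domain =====

-- B replaces A's per-bit dec→binary loop, two pad-to-multiple-of-4 loops and the
-- adjacent-digit Gray loop by the closed form n ^ (n >> 1), formatted once and
-- zero-filled to width ceil(bit_length/4)*4.

-- ===== PORT A =====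

-- int(x) where x is a digit character produced by str(dec % 2): exact on '0'/'1',
-- the only characters ever reaching this conversion
def pvCharVal (c : Char) : Int := if c = '1' then 1 else 0

-- while dec > 0: binary_str = str(dec % 2) + binary_str; dec = dec // 2
def pvBinLoop (dec : Int) (acc : List Char) : List Char :=
  if 0 < dec then
    pvBinLoop (PySem.Int.floordiv dec 2) ((PySem.Int.toStr (PySem.Int.mod dec 2)).toList ++ acc)
  else acc
termination_by dec.toNat
decreasing_by
  rw [PySem.Int.floordiv_eq_ediv_of_pos (by omega)]
  omega

-- while len(s) % 4 != 0: s = '0' + s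
def pvPad4 (s : List Char) : List Char :=
  if s.length % 4 ≠ 0 then pvPad4 ('0' :: s) else s
termination_by (4 - s.length % 4) % 4
decreasing_by simp only [List.length_cons]; omega

-- def dec_to_bin_changer(dec): … (none = the ValueError of int(dec))
def dec_to_bin_changer (dec : String) : Option String :=
  (PySem.Int.ofStr? dec).map (fun n => String.ofList (pvPad4 (pvBinLoop n [])))

-- def bin_to_gray_code_changer(bin): … ("" stands for the IndexError of bin_arr[0]
-- on the empty string; Pre_ excludes the inputs that reach it)
def bin_to_gray_code_changer (bin : String) : String :=
  let bin_arr := bin.toList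
  match PySem.List.pyGet? bin_arr 0 with
  | none => ""
  | some c0 =>
    let gray_result_arr := (PySem.List.pyRange 1 bin_arr.length 1).foldl (fun acc i =>
      if pvCharVal (PySem.List.pyGetD bin_arr i '0')
           + pvCharVal (PySem.List.pyGetD bin_arr (i - 1) '0') = 2 then
        acc ++ ['0']
      else
        acc ++ (PySem.Int.toStr (pvCharVal (PySem.List.pyGetD bin_arr i '0')
           + pvCharVal (PySem.List.pyGetD bin_arr (i - 1) '0'))).toList) [c0]
    String.ofList (gray_result_arr.foldl (fun acc c => acc ++ [c]) [])

def dec_to_gray_code_changer (dec : String) : String :=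
  match dec_to_bin_changer dec with
  | none => ""   -- ValueError of int(dec), excluded by Pre_
  | some bin_num =>
    let bin_arr := bin_num.toList
    let bin_num2 := bin_arr.foldl (fun acc c => acc ++ [c]) ([] : List Char)
    bin_to_gray_code_changer (String.ofList (pvPad4 bin_num2))

-- ===== PORT B =====

-- format(g, 'b') for g > 0: binary digits of g, most significant first
def pvBits (n : Nat) : List Char :=
  if n = 0 then [] else pvBits (n / 2) ++ [if n % 2 = 1 then '1' else '0']
termination_by n
decreasing_by omega

-- format(g, 'b') for g ≥ 0
def pvFormatB (g : Nat) : List Char := if g = 0 then ['0'] else pvBits g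

-- str.zfill(w) for an unsigned digit string
def pvZfill (w : Nat) (l : List Char) : List Char := List.replicate (w - l.length) '0' ++ l

def dec_to_gray_code_changer_alt (dec : String) : String :=
  match PySem.Int.ofStr? dec with
  | none => ""   -- ValueError of int(dec), excluded by Pre_
  | some n =>
    let gray := PySem.Int.bxor n (n >>> 1)
    let width := (PySem.Int.bitLength n + 3) / 4 * 4
    -- n ^ (n >> 1) is never negative (xor of two ints of equal sign), so
    -- format(gray, 'b') is the digit string of gray.toNat
    String.ofList (pvZfill width (pvFormatB gray.toNat))

-- ===== PRECONDITION & SPEC =====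
-- A raises ValueError when int(dec) fails and IndexError when int(dec) <= 0
-- (empty binary string, then bin_arr[0]); Pre_ admits exactly the inputs where A returns.
def Pre_dec_to_gray_code_changer (dec : String) : Prop :=
  (PySem.Int.ofStr? dec).isSome = true ∧ 0 < (PySem.Int.ofStr? dec).getD 0
instance (dec : String) : Decidable (Pre_dec_to_gray_code_changer dec) := by
  unfold Pre_dec_to_gray_code_changer; infer_instance

def pvWitness_dec_to_gray_code_changer : String := "5"

def Spec_dec_to_gray_code_changer (dec : String) (out : String) : Prop := out = dec_to_gray_code_changer_alt dec
instance (dec : String) (out : String) : Decidable (Spec_dec_to_gray_code_changer dec out) := by unfold Spec_dec_to_gray_code_changer; infer_instance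

-- ===== CLAIM (what is proved, stated in full; the proofs are below) =====
def Claim_equal_dec_to_gray_code_changer : Prop := ∀ (dec : String), Dom_dec_to_gray_code_changer dec → Pre_dec_to_gray_code_changer dec → Spec_dec_to_gray_code_changer dec (dec_to_gray_code_changer dec)

-- ===== LEMMAS AND PROOFS =====

-- the bit of m at position i, as the character both programs' strings hold there
def pvBitChar (m : Nat) (i : Nat) : Char := if m.testBit i then '1' else '0'

-- A's dec→binary loop produces the digit string of pvBits
lemma pvBinLoop_eq (m : Nat) (acc : List Char) :
    pvBinLoop (m : Int) acc = pvBits m ++ acc := by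
  induction m using Nat.strong_induction_on generalizing acc with
  | _ m ih =>
    rw [pvBinLoop, pvBits]
    by_cases hm : m = 0
    · simp [hm]
    · rw [if_pos (by exact_mod_cast Nat.pos_of_ne_zero hm), if_neg hm]
      rw [show PySem.Int.floordiv (m : Int) 2 = ((m / 2 : Nat) : Int) from
            (by exact_mod_cast PySem.Int.floordiv_natCast m 2),
          show PySem.Int.mod (m : Int) 2 = ((m % 2 : Nat) : Int) from
            (by exact_mod_cast PySem.Int.mod_natCast m 2)]
      rw [ih (m / 2) (by omega)]
      rcases Nat.mod_two_eq_zero_or_one m with h | h <;> simp [h] <;> rfl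

lemma pvBits_length (m : Nat) : (pvBits m).length = PySem.Int.bitLength (m : Int) := by
  induction m using Nat.strong_induction_on with
  | _ m ih =>
    rw [pvBits]
    by_cases hm : m = 0
    · simp [hm, PySem.Int.bitLength_zero]
    · rw [if_neg hm, PySem.Int.bitLength_natCast (Nat.pos_of_ne_zero hm)]
      simp [ih (m / 2) (by omega)]

lemma pvBitLength_le_of_lt_two_pow (m L : Nat) (h : m < 2 ^ L) :
    PySem.Int.bitLength (m : Int) ≤ L := by
  induction L generalizing m with
  | zero => interval_cases m; simp [PySem.Int.bitLength_zero]
  | succ L ih =>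
    by_cases hm : m = 0
    · simp [hm, PySem.Int.bitLength_zero]
    · rw [PySem.Int.bitLength_natCast (Nat.pos_of_ne_zero hm)]
      have := ih (m / 2) (by omega)
      omega

-- zero-padding the digit string to width L is the msb-first table of testBit
lemma pvBits_pad_eq (L : Nat) (m : Nat) (h : m < 2 ^ L) :
    List.replicate (L - (pvBits m).length) '0' ++ pvBits m
      = (List.range L).reverse.map (pvBitChar m) := by
  induction L generalizing m with
  | zero => interval_cases m; simp [pvBits]
  | succ L ih =>
    have hrev : (List.range (L+1)).reverse.map (pvBitChar m)
        = (List.range L).reverse.map (pvBitChar (m / 2)) ++ [pvBitChar m 0] := by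
      rw [List.range_succ_eq_map]
      simp only [List.reverse_cons, List.map_append, List.map_reverse, List.map_map, List.map_cons,
        List.map_nil]
      simp only [Function.comp_def]
      congr 1
      congr 1
      apply List.map_congr_left
      intro i _
      simp [pvBitChar, Nat.testBit_div_two, Nat.succ_eq_add_one]
    by_cases hm : m = 0
    · subst hm
      rw [show pvBits 0 = [] by rw [pvBits]; norm_num]
      simp only [List.length_nil, List.append_nil, Nat.sub_zero]
      rw [hrev]
      symm
      rw [List.eq_replicate_iff]
      refine ⟨by simp, ?_⟩
      intro b hb
      simp only [List.mem_append, List.mem_map, List.mem_singleton] at hb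
      rcases hb with ⟨a, _, rfl⟩ | rfl <;> simp [pvBitChar, Nat.zero_testBit]
    · rw [hrev, ← ih (m / 2) (by omega)]
      conv_lhs => rw [pvBits, if_neg hm]
      have hlen : (pvBits (m/2)).length ≤ L := by
        rw [pvBits_length]; exact pvBitLength_le_of_lt_two_pow _ _ (by omega)
      simp only [List.length_append, List.length_singleton]
      rw [show L + 1 - ((pvBits (m/2)).length + 1) = L - (pvBits (m/2)).length by omega]
      rw [show pvBitChar m 0 = if m % 2 = 1 then '1' else '0' by
        simp [pvBitChar, Nat.testBit_zero]]
      simp [List.append_assoc]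

-- A's pad-to-multiple-of-4 loop in closed form
lemma pvPad4_eq (s : List Char) :
    pvPad4 s = List.replicate ((s.length + 3) / 4 * 4 - s.length) '0' ++ s := by
  generalize hk : (4 - s.length % 4) % 4 = k
  induction k generalizing s with
  | zero =>
    rw [pvPad4, if_neg (by omega)]
    rw [show (s.length + 3) / 4 * 4 - s.length = 0 by omega]
    simp
  | succ k ih =>
    rw [pvPad4, if_pos (by omega)]
    rw [ih ('0' :: s) (by simp; omega)]
    simp only [List.length_cons]
    rw [show (s.length + 1 + 3) / 4 * 4 - (s.length + 1) = (s.length + 3) / 4 * 4 - s.length - 1 by omega]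
    rw [show (s.length + 3) / 4 * 4 - s.length = ((s.length + 3) / 4 * 4 - s.length - 1) + 1 by omega]
    simp [List.replicate_succ']

lemma map_reverse_range (M : Nat) (f : Nat → Char) :
    (List.range M).reverse.map f = (List.range M).map (fun k => f (M - 1 - k)) := by
  apply List.ext_getElem
  · simp
  · intro j h1 h2
    simp [List.getElem_reverse]

lemma flatMap_eq_map (l : List Nat) (g : Nat → List Char) (h : Nat → Char)
    (hg : ∀ x ∈ l, g x = [h x]) : l.flatMap g = l.map h := by
  induction l with
  | nil => rfl
  | cons a t ih =>
    simp only [List.flatMap_cons, List.map_cons, hg a (by simp), ih (fun x hx => hg x (by simp [hx]))]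
    rfl

lemma lget (L m j : Nat) (hj : j < L) :
    ((List.range L).reverse.map (pvBitChar m))[j]'(by simp [hj]) = pvBitChar m (L - 1 - j) := by
  simp [List.getElem_reverse]

-- the Gray loop on the padded bit table of m is the padded bit table of m ^^^ m / 2
lemma pvGray_eq (L m : Nat) (hL : 0 < L) (h : m < 2 ^ L) :
    bin_to_gray_code_changer (String.ofList ((List.range L).reverse.map (pvBitChar m)))
      = String.ofList ((List.range L).reverse.map (pvBitChar (m ^^^ m / 2))) := by
  set l := (List.range L).reverse.map (pvBitChar m) with hl
  have hlen : l.length = L := by simp [hl]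
  have hlget : ∀ j (hj : j < L), l[j]'(by omega) = pvBitChar m (L - 1 - j) := by
    intro j hj; exact lget L m j hj
  have hget0 : PySem.List.pyGet? l 0 = some (pvBitChar m (L - 1)) := by
    have : (0:Int) = ((0:Nat) : Int) := rfl
    rw [this, PySem.List.pyGet?_natCast]
    rw [List.getElem?_eq_getElem (by omega)]
    exact congrArg some (hlget 0 hL)
  unfold bin_to_gray_code_changer
  simp only [String.toList_ofList, hget0, hlen]
  rw [PySem.List.foldl_append_singleton_eq_self, List.nil_append]
  have hfun : (fun (acc : List Char) (i : Int) =>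
      if pvCharVal (PySem.List.pyGetD l i '0') + pvCharVal (PySem.List.pyGetD l (i - 1) '0') = 2
      then acc ++ ['0']
      else acc ++ (PySem.Int.toStr (pvCharVal (PySem.List.pyGetD l i '0')
            + pvCharVal (PySem.List.pyGetD l (i - 1) '0'))).toList)
      = fun acc i => acc ++ (if pvCharVal (PySem.List.pyGetD l i '0')
            + pvCharVal (PySem.List.pyGetD l (i - 1) '0') = 2 then ['0']
          else (PySem.Int.toStr (pvCharVal (PySem.List.pyGetD l i '0')
            + pvCharVal (PySem.List.pyGetD l (i - 1) '0'))).toList) := by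
    funext acc i; split <;> rfl
  rw [hfun, PySem.List.foldl_append_eq_flatMap, PySem.List.pyRange_one]
  rw [show ((L:Int) - 1).toNat = L - 1 by omega]
  rw [List.flatMap_map]
  rw [flatMap_eq_map _ _ (fun k => pvBitChar (m ^^^ m / 2) (L - 2 - k)) ?_]
  · -- assemble both sides
    conv_rhs => rw [show (List.range L) = List.range ((L-1)+1) by rw [Nat.sub_add_cancel hL],
      List.range_succ]
    simp only [List.reverse_append, List.reverse_cons, List.reverse_nil, List.nil_append,
      List.map_cons, List.cons_append]
    rw [map_reverse_range]
    have hbitL : m.testBit L = false := Nat.testBit_lt_two_pow h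
    congr 1
    congr 1
    · -- head: bit L-1 of m equals bit L-1 of the gray value (bit L of m is 0)
      simp [pvBitChar, Nat.testBit_xor, Nat.testBit_div_two,
        Nat.sub_add_cancel hL, hbitL]
  · -- each loop step appends exactly the gray bit at position L-2-k
    intro k hk
    simp only [List.mem_range] at hk
    have e1 : (1 + (k:Int)) = ((k+1 : Nat) : Int) := by push_cast; ring
    have e2 : ((k + 1 : Nat) : Int) - 1 = ((k : Nat) : Int) := by push_cast; ring
    rw [e1, e2, PySem.List.pyGetD_natCast, PySem.List.pyGetD_natCast]
    rw [List.getD_eq_getElem _ _ (by omega), List.getD_eq_getElem _ _ (by omega)]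
    rw [hlget (k+1) (by omega), hlget k (by omega)]
    rw [show L - 1 - (k+1) = L - 2 - k by omega, show L - 1 - k = L - 2 - k + 1 by omega]
    by_cases h1 : m.testBit (L - 2 - k) <;> by_cases h2 : m.testBit (L - 2 - k + 1) <;>
      simp [pvBitChar, pvCharVal, h1, h2, Nat.testBit_xor, Nat.testBit_div_two] <;> decide

-- ===== VERDICT (by name: the statement is the Claim_ definition above) =====
theorem dec_to_gray_code_changer_spec : Claim_equal_dec_to_gray_code_changer := by
  intro dec _ hpre
  obtain ⟨hs, hpos⟩ := hpre
  unfold Spec_dec_to_gray_code_changer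
  obtain ⟨n, hn⟩ := Option.isSome_iff_exists.mp hs
  have hpos' : 0 < n := by rw [hn] at hpos; simpa using hpos
  obtain ⟨m, rfl⟩ := Int.eq_ofNat_of_zero_le (le_of_lt hpos')
  have hm : 0 < m := by exact_mod_cast hpos'
  set B := PySem.Int.bitLength ((m : Nat) : Int) with hB
  have hB1 : 1 ≤ B := by
    rw [hB, PySem.Int.bitLength_natCast hm]; omega
  set T := (B + 3) / 4 * 4 with hT
  have hBT : B ≤ T := by omega
  have hmB : m < 2 ^ B := by
    have := PySem.Int.lt_two_pow_bitLength ((m : Nat) : Int)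
    simpa using this
  have hmT : m < 2 ^ T := lt_of_lt_of_le hmB (Nat.pow_le_pow_right (by omega) hBT)
  have hgrT : m ^^^ m / 2 < 2 ^ T :=
    Nat.xor_lt_two_pow hmT (lt_of_le_of_lt (Nat.div_le_self m 2) hmT)
  -- A's first pad in bit-table form
  have hpad1 : pvPad4 (pvBits m) = (List.range T).reverse.map (pvBitChar m) := by
    rw [pvPad4_eq, pvBits_length, ← hB, ← hT, ← pvBits_pad_eq T m hmT]
    congr 2
    rw [pvBits_length, ← hB]
  have hlenT : ((List.range T).reverse.map (pvBitChar m)).length = T := by simp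
  -- A's second pad is a no-op
  have hpad2 : pvPad4 ((List.range T).reverse.map (pvBitChar m))
      = (List.range T).reverse.map (pvBitChar m) := by
    rw [pvPad4, if_neg]
    rw [hlenT]; omega
  -- A side
  unfold dec_to_gray_code_changer dec_to_bin_changer
  rw [hn]
  simp only [Option.map_some, String.toList_ofList,
    PySem.List.foldl_append_singleton_eq_self, List.nil_append]
  rw [pvBinLoop_eq, List.append_nil, hpad1, hpad2]
  rw [pvGray_eq T m (by omega) hmT]
  -- B side
  unfold dec_to_gray_code_changer_alt
  rw [hn]
  have hgray : PySem.Int.bxor ((m:Nat):Int) (((m:Nat):Int) >>> 1) = ((m ^^^ m / 2 : Nat) : Int) := by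
    rw [show (((m:Nat):Int) >>> 1) = ((m >>> 1 : Nat) : Int) from (Int.natCast_shiftRight m 1).symm]
    rw [PySem.Int.bxor_natCast, Nat.shiftRight_one]
  simp only [hgray, Int.toNat_natCast, ← hB, ← hT]
  have hg0 : m ^^^ m / 2 ≠ 0 := by
    intro h0
    have := Nat.xor_eq_zero_iff.mp h0
    omega
  rw [pvFormatB, if_neg hg0, pvZfill, pvBits_pad_eq T _ hgrT]
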